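-- pv_equiv track=rewrite | github.com/a-bautista/CodingChallenges | Training_2021_2022/2021/4-April/23-April-2021/MinimumDeletionCostToAvoidRepeatingLetters.py | solve
-- ===== SOURCE A (Python) =====
-- def solve(s, cost):
--     maxCost = res = 0
--     for i in range(len(s)):
--         # if letters are distinct then reset the max cost to 0
--         if i > 0 and s[i]!=s[i-1]:
--             maxCost = 0
--         # sum to res the minimum value from maxCost and the current ith in cost
--         res+= min(maxCost, cost[i])
--         # get the max cost from the current ith in cost
--         maxCost = max(maxCost, cost[i])
--     return res
-- ===== SOURCE B (Python) =====
-- def solve(s, cost):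
--     # Walk maximal runs of equal adjacent characters; keep every run's most
--     # expensive element (baseline 0), delete the rest.
--     pairs = list(zip(s, cost))
--     res = 0
--     i = 0
--     while i < len(pairs):
--         ch = pairs[i][0]
--         run_sum = 0
--         run_max = 0
--         while i < len(pairs) and pairs[i][0] == ch:
--             c = pairs[i][1]
--             run_sum += c
--             if c > run_max:
--                 run_max = c
--             i += 1
--         res += run_sum - run_max
--     return res
-- ===== Notes on version B (the rewrite author's own statement) =====
-- stated objective: alternative
-- what changed: B replaces A's per-index running min/max fold over range(len(s)) by a two-level while loop over maximal runs of equal adjacent characters, adding sum(run) - max(run, 0) per run.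
import Mathlib
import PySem

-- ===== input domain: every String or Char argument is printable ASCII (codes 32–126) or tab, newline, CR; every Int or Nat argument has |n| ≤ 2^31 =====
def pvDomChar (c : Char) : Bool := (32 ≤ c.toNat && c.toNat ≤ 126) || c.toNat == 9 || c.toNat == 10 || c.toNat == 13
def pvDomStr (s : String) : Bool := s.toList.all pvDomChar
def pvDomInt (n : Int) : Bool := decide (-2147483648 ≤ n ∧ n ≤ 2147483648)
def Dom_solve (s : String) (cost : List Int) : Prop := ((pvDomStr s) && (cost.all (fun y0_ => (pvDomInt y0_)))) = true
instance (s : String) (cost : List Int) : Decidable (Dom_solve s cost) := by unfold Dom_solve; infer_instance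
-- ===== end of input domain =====

-- B walks maximal runs of equal adjacent characters instead of A's per-index
-- running min/max fold; equivalence of the two decompositions is proved below.
-- Pre_ excludes len(cost) < len(s), where A raises IndexError (the proof is about return values).

-- ===== PORT A =====
def solve (s : String) (cost : List Int) : Int :=
  (((PySem.List.pyRange 0 (PySem.Str.len s) 1).foldl (fun (st : Int × Int) i =>
      -- if i > 0 and s[i] != s[i-1]: maxCost = 0
      let maxCost : Int :=
        if i > 0 ∧ PySem.Str.pyGet? s i ≠ PySem.Str.pyGet? s (i - 1) then 0 else st.1
      -- res += min(maxCost, cost[i]); maxCost = max(maxCost, cost[i])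
      let c := PySem.List.pyGetD cost i 0   -- in range under Pre_solve
      (max maxCost c, st.2 + min maxCost c)) ((0 : Int), (0 : Int)))).2

-- ===== PORT B =====
-- inner while loop of Source B: consume the run of characters equal to ch,
-- accumulating run_sum and run_max; returns (run_sum, run_max, rest)
def runScan (ch : Char) (runSum runMax : Int) :
    List (Char × Int) → Int × Int × List (Char × Int)
  | [] => (runSum, runMax, [])
  | (c, x) :: rest =>
      if c = ch then runScan ch (runSum + x) (if x > runMax then x else runMax) rest
      else (runSum, runMax, (c, x) :: rest)

theorem runScan_rest_len (ch : Char) (runSum runMax : Int) (l : List (Char × Int)) :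
    (runScan ch runSum runMax l).2.2.length ≤ l.length := by
  induction l generalizing runSum runMax with
  | nil => simp [runScan]
  | cons p rest ih =>
    obtain ⟨c, x⟩ := p
    simp only [runScan]
    split
    · exact Nat.le_trans (ih _ _) (Nat.le_succ _)
    · exact Nat.le_refl _

-- outer while loop of Source B over the zipped pairs
def runLoop : List (Char × Int) → Int
  | [] => 0
  | (c, x) :: rest =>
      let r := runScan c 0 0 ((c, x) :: rest)
      (r.1 - r.2.1) + runLoop r.2.2
termination_by l => l.length
decreasing_by
  simp only [runScan]
  exact Nat.lt_succ_of_le (runScan_rest_len _ _ _ _)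

def solve_alt (s : String) (cost : List Int) : Int :=
  runLoop (s.toList.zip cost)

-- ===== PRECONDITION & SPEC =====
-- Pre_ excludes exactly the inputs where A raises IndexError (cost shorter than s).
def Pre_solve (s : String) (cost : List Int) : Prop := s.toList.length ≤ cost.length
instance (s : String) (cost : List Int) : Decidable (Pre_solve s cost) := by
  unfold Pre_solve; infer_instance

def pvWitness_solve : String × List Int := ("aabc", [1, 2, 3, 4])

def Spec_solve (s : String) (cost : List Int) (out : Int) : Prop := out = solve_alt s cost
instance (s : String) (cost : List Int) (out : Int) : Decidable (Spec_solve s cost out) := by unfold Spec_solve; infer_instance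

-- ===== CLAIM (what is proved, stated in full; the proofs are below) =====
def Claim_equal_solve : Prop := ∀ (s : String) (cost : List Int), Dom_solve s cost → Pre_solve s cost → Spec_solve s cost (solve s cost)

-- ===== LEMMAS AND PROOFS =====

-- A's loop body rewritten as structural recursion over (char, cost) pairs,
-- carrying the previous character: the bridge between the two ports.
def aGo (prev : Char) (maxCost res : Int) : List (Char × Int) → Int
  | [] => res
  | (c, x) :: rest =>
      let m : Int := if c ≠ prev then 0 else maxCost
      aGo c (max m x) (res + min m x) rest

theorem runLoop_cons (c : Char) (x : Int) (rest : List (Char × Int)) :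
    runLoop ((c, x) :: rest) =
      ((runScan c 0 0 ((c, x) :: rest)).1 - (runScan c 0 0 ((c, x) :: rest)).2.1)
        + runLoop (runScan c 0 0 ((c, x) :: rest)).2.2 := by
  rw [runLoop]

-- key identity: A's running min/max accumulation equals B's per-run sum-minus-max
theorem aGo_eq_runLoop (l : List (Char × Int)) :
    ∀ (prev : Char) (mc res s0 : Int),
      aGo prev mc res l =
        res + ((runScan prev s0 mc l).1 - s0) + mc - (runScan prev s0 mc l).2.1
          + runLoop (runScan prev s0 mc l).2.2 := by
  induction l with
  | nil => intro prev mc res s0; simp [aGo, runScan, runLoop]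
  | cons p rest ih =>
    intro prev mc res s0
    obtain ⟨c, x⟩ := p
    by_cases hc : c = prev
    · subst hc
      simp only [aGo, runScan, ne_eq, not_true_eq_false, if_false, if_true]
      rw [ih c (max mc x) (res + min mc x) (s0 + x)]
      have hmx : (if x > mc then x else mc) = max mc x := by split_ifs <;> omega
      rw [hmx]
      omega
    · simp only [aGo, runScan, ne_eq, hc, not_false_eq_true, if_pos, if_false]
      rw [runLoop_cons]
      have hx : (if x > 0 then x else (0 : Int)) = max 0 x := by split_ifs <;> omega
      have hs : runScan c 0 0 ((c, x) :: rest) = runScan c x (max 0 x) rest := by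
        simp only [runScan, if_true, zero_add, hx]
      rw [hs, ih c (max 0 x) (res + min 0 x) x]
      omega

-- A's indexed fold over range(k, n) equals aGo on the zipped suffix, for k ≥ 1
theorem solve_fold_suffix (cs : List Char) (cost : List Int)
    (hlen : cs.length ≤ cost.length) :
    ∀ (d k : Nat), k + d = cs.length → 1 ≤ k → ∀ (mc res : Int),
      ((PySem.List.pyRange (k : Int) (cs.length : Int) 1).foldl (fun (st : Int × Int) i =>
        let maxCost : Int :=
          if i > 0 ∧ PySem.List.pyGet? cs i ≠ PySem.List.pyGet? cs (i - 1) then 0 else st.1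
        let c := PySem.List.pyGetD cost i 0
        (max maxCost c, st.2 + min maxCost c)) (mc, res)).2 =
      aGo (cs.getD (k - 1) 'a') mc res ((cs.zip cost).drop k) := by
  intro d
  induction d with
  | zero =>
    intro k hk _ mc res
    have hk' : k = cs.length := by omega
    subst hk'
    rw [PySem.List.pyRange_one_eq_nil (le_refl _)]
    have : (cs.zip cost).length = cs.length := by
      rw [List.length_zip]; omega
    rw [List.drop_eq_nil_of_le (by omega)]
    simp [aGo]
  | succ d ih =>
    intro k hk hk1 mc res
    have hklt : k < cs.length := by omega
    have hkc : k < cost.length := by omega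
    rw [PySem.List.pyRange_one_cons (by exact_mod_cast hklt)]
    rw [List.foldl_cons]
    -- evaluate the step at index k
    have h1 : ((k : Int)).toNat = k := by omega
    have h2 : (((k : Int)) - 1).toNat = k - 1 := by omega
    have hget : PySem.List.pyGet? cs ((k : Int)) = some cs[((k:Int)).toNat] :=
      PySem.List.pyGet?_eq_some_getElem cs (by omega) (by exact_mod_cast hklt)
    have hget' : PySem.List.pyGet? cs ((k : Int) - 1) = some cs[((k:Int) - 1).toNat] :=
      PySem.List.pyGet?_eq_some_getElem cs (by omega) (by omega)
    have hcost : PySem.List.pyGetD cost (k : Int) 0 = cost[k] :=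
      PySem.List.pyGetD_ofNat cost k 0 hkc
    have hdrop : (cs.zip cost).drop k = (cs[k], cost[k]) :: (cs.zip cost).drop (k + 1) := by
      have hzk : k < (cs.zip cost).length := by rw [List.length_zip]; omega
      rw [List.drop_eq_getElem_cons hzk]
      congr 1
      exact List.getElem_zip
    have hpos : ((k : Int)) > 0 := by exact_mod_cast hk1
    simp only [hget, hget', hcost, hpos, true_and, h1, h2]
    rw [show ((k : Int) + 1) = ((k + 1 : Nat) : Int) by push_cast; ring]
    rw [ih (k + 1) (by omega) (by omega)]
    rw [hdrop]
    simp only [aGo, Nat.add_sub_cancel]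
    have hprev : cs.getD k 'a' = cs[k] :=
      List.getD_eq_getElem cs 'a' (show k < cs.length by omega)
    have hcond : (cs[k] ≠ cs.getD (k - 1) 'a') = (some cs[k] ≠ some cs[k - 1]) := by
      rw [List.getD_eq_getElem cs 'a' (show k - 1 < cs.length by omega)]
      simp
    rw [hprev]
    simp only [hcond]

-- main equivalence on the list side
theorem solve_eq_alt (s : String) (cost : List Int) (h : Pre_solve s cost) :
    solve s cost = solve_alt s cost := by
  unfold solve solve_alt Pre_solve at *
  simp only [PySem.Str.len_eq, PySem.Str.pyGet?]
  simp only [show PySem.Chars.pyGet? = PySem.List.pyGet? from rfl]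
  cases hcs : s.toList with
  | nil =>
    simp [runLoop, PySem.List.pyRange_one_eq_nil]
  | cons c0 rest =>
    rw [hcs] at h
    have hlen : (c0 :: rest).length ≤ cost.length := h
    have hlen0 : 0 < (c0 :: rest).length := by simp
    obtain ⟨x0, cost', hcost⟩ : ∃ x0 cost', cost = x0 :: cost' := by
      cases cost with
      | nil => simp at hlen
      | cons a b => exact ⟨a, b, rfl⟩
    subst hcost
    -- peel the first iteration (i = 0)
    rw [PySem.List.pyRange_one_cons (by exact_mod_cast hlen0), List.foldl_cons]
    simp only [gt_iff_lt, lt_self_iff_false, false_and, if_false]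
    have hcost0 : PySem.List.pyGetD (x0 :: cost') (0 : Int) 0 = x0 := by
      simp [PySem.List.pyGetD_zero_cons]
    rw [hcost0]
    rw [show (0 : Int) + 1 = ((1 : Nat) : Int) by norm_num]
    rw [solve_fold_suffix (c0 :: rest) (x0 :: cost') hlen ((c0 :: rest).length - 1) 1
      (by omega) (le_refl 1)]
    have hgd : (c0 :: rest).getD 0 'a' = c0 := by simp
    rw [hgd]
    -- now relate aGo to runLoop via aGo_eq_runLoop
    have hz : (c0 :: rest).zip (x0 :: cost') = (c0, x0) :: rest.zip cost' := by simp
    rw [hz]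
    simp only [List.drop_succ_cons, List.drop_zero]
    rw [aGo_eq_runLoop (rest.zip cost') c0 (max 0 x0) (0 + min 0 x0) x0]
    rw [runLoop_cons]
    have hx0 : (if x0 > 0 then x0 else (0 : Int)) = max 0 x0 := by split_ifs <;> omega
    have hs : runScan c0 0 0 ((c0, x0) :: rest.zip cost') = runScan c0 x0 (max 0 x0) (rest.zip cost') := by
      simp only [runScan, if_true, zero_add, hx0]
    rw [hs]
    omega

-- ===== VERDICT (by name: the statement is the Claim_ definition above) =====
theorem solve_spec : Claim_equal_solve := by
  intro s cost _ hpre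
  unfold Spec_solve
  exact solve_eq_alt s cost hpre
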